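-- pv_equiv track=rewrite | github.com/PedroL10/FPAA-Grupo-Labirinto | main.py | encontrar_posicoes
-- ===== SOURCE A (Python) =====
-- INICIO = 'S'
--
-- FIM = 'E'
--
-- def encontrar_posicoes(matriz):
--     inicio = fim = None
--     for i, linha in enumerate(matriz):
--         for j, valor in enumerate(linha):
--             if valor == INICIO:
--                 inicio = (i, j)
--             elif valor == FIM:
--                 fim = (i, j)
--     return inicio, fim
-- ===== SOURCE B (Python) =====
-- INICIO = 'S'
--
-- FIM = 'E'
--
-- def encontrar_posicoes(matriz):
--     # Two independent searches in reverse row-major order: the first cell seen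
--     # in reverse equals the last one in forward order, which is what A's
--     # overwriting scan keeps. Each search stops at the first hit.
--     def ultima_posicao(marcador):
--         for i, linha in reversed(list(enumerate(matriz))):
--             for j, valor in reversed(list(enumerate(linha))):
--                 if valor == marcador:
--                     return (i, j)
--         return None
--     return ultima_posicao(INICIO), ultima_posicao(FIM)
-- ===== Notes on version B (the rewrite author's own statement) =====
-- stated objective: alternative
-- what changed: B performs two independent reverse row-major searches, each returning the first marker cell seen (= the last in forward order) and stopping there, instead of A's single forward scan over all cells that keeps overwriting both positions.
import Mathlib
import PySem

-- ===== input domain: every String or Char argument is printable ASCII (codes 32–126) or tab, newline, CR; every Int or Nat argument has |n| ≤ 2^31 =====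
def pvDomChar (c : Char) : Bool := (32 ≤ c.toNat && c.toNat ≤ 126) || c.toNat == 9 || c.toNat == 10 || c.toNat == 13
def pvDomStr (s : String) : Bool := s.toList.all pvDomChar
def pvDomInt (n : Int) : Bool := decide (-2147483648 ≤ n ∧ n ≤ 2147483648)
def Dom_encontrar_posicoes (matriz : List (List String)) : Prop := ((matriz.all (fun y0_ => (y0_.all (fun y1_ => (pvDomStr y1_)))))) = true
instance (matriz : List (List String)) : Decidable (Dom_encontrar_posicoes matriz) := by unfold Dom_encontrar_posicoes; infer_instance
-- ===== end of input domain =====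

-- B replaces A's single forward scan with overwriting state by two independent
-- reverse row-major searches that each stop at their first hit (objective: alternative).

-- ===== PORT A =====
def encontrar_posicoes (matriz : List (List String)) : (Option (Int × Int)) × (Option (Int × Int)) :=
  (PySem.List.enumerate matriz).foldl
    (fun st p =>
      (PySem.List.enumerate p.2).foldl
        (fun st2 q =>
          if q.2 = "S" then (some (p.1, q.1), st2.2)
          else if q.2 = "E" then (st2.1, some (p.1, q.1))
          else st2)
        st)
    (none, none)

-- ===== PORT B =====
-- inner loop of ultima_posicao: reversed enumerated cells of row i, return on first hit
def pvUltimaRow (marcador : String) (i : Int) : List (Int × String) → Option (Int × Int)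
  | [] => none
  | q :: rest => if q.2 = marcador then some (i, q.1) else pvUltimaRow marcador i rest

-- outer loop of ultima_posicao: reversed enumerated rows
def pvUltima (marcador : String) : List (Int × List String) → Option (Int × Int)
  | [] => none
  | r :: rest =>
    match pvUltimaRow marcador r.1 (PySem.List.enumerate r.2).reverse with
    | some p => some p
    | none => pvUltima marcador rest

def encontrar_posicoes_alt (matriz : List (List String)) : (Option (Int × Int)) × (Option (Int × Int)) :=
  (pvUltima "S" (PySem.List.enumerate matriz).reverse,
   pvUltima "E" (PySem.List.enumerate matriz).reverse)

-- ===== PRECONDITION & SPEC =====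
def Spec_encontrar_posicoes (matriz : List (List String)) (out : (Option (Int × Int)) × (Option (Int × Int))) : Prop := out = encontrar_posicoes_alt matriz
instance (matriz : List (List String)) (out : (Option (Int × Int)) × (Option (Int × Int))) : Decidable (Spec_encontrar_posicoes matriz out) := by unfold Spec_encontrar_posicoes; infer_instance

-- ===== CLAIM (what is proved, stated in full; the proofs are below) =====
def Claim_equal_encontrar_posicoes : Prop := ∀ (matriz : List (List String)), Dom_encontrar_posicoes matriz → Spec_encontrar_posicoes matriz (encontrar_posicoes matriz)

-- ===== LEMMAS AND PROOFS =====

-- first-match join: some wins from the left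
def pvJoin (a b : Option (Int × Int)) : Option (Int × Int) :=
  match a with | some p => some p | none => b

theorem pvJoin_assoc (a b c : Option (Int × Int)) :
    pvJoin (pvJoin a b) c = pvJoin a (pvJoin b c) := by
  cases a <;> cases b <;> rfl

theorem pvJoin_none_right (a : Option (Int × Int)) : pvJoin a none = a := by
  cases a <;> rfl

-- first cell carrying marker m, in the given cell order / row order
def pvF (m : String) (i : Int) (cells : List (Int × String)) : Option (Int × Int) :=
  (cells.find? (fun q => q.2 == m)).map (fun q => (i, q.1))

def pvG (m : String) : List (Int × List String) → Option (Int × Int)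
  | [] => none
  | r :: rest => pvJoin (pvF m r.1 (PySem.List.enumerate r.2).reverse) (pvG m rest)

theorem pvF_append (m : String) (i : Int) (xs ys : List (Int × String)) :
    pvF m i (xs ++ ys) = pvJoin (pvF m i xs) (pvF m i ys) := by
  induction xs with
  | nil => rfl
  | cons q rest ih =>
    simp only [pvF, List.cons_append, List.find?_cons] at *
    by_cases h : q.2 == m
    · simp [h, pvJoin]
    · simp only [h]
      exact ih

theorem pvG_append (m : String) (xs ys : List (Int × List String)) :
    pvG m (xs ++ ys) = pvJoin (pvG m xs) (pvG m ys) := by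
  induction xs with
  | nil => rfl
  | cons r rest ih => simp [pvG, ih, pvJoin_assoc]

-- A's inner fold: last match in the row, else the incoming state
theorem pvA_inner (i : Int) (cells : List (Int × String))
    (st : (Option (Int × Int)) × (Option (Int × Int))) :
    cells.foldl
      (fun st2 q =>
        if q.2 = "S" then (some (i, q.1), st2.2)
        else if q.2 = "E" then (st2.1, some (i, q.1))
        else st2) st
    = (pvJoin (pvF "S" i cells.reverse) st.1, pvJoin (pvF "E" i cells.reverse) st.2) := by
  induction cells generalizing st with
  | nil => simp [pvF, pvJoin]
  | cons q rest ih =>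
    simp only [List.foldl_cons, ih, List.reverse_cons, pvF_append, pvJoin_assoc]
    congr 1 <;> congr 1 <;>
      cases hs : q.2 == "S" <;> cases he : q.2 == "E" <;>
        simp_all [pvF, pvJoin, List.find?, beq_iff_eq, beq_eq_false_iff_ne] <;>
          simp [beq_eq_false_iff_ne.mpr hs, beq_eq_false_iff_ne.mpr he]

-- A's outer fold: last match over all rows, else the incoming state
theorem pvA_outer (rows : List (Int × List String))
    (st : (Option (Int × Int)) × (Option (Int × Int))) :
    rows.foldl
      (fun st p =>
        (PySem.List.enumerate p.2).foldl
          (fun st2 q =>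
            if q.2 = "S" then (some (p.1, q.1), st2.2)
            else if q.2 = "E" then (st2.1, some (p.1, q.1))
            else st2) st) st
    = (pvJoin (pvG "S" rows.reverse) st.1, pvJoin (pvG "E" rows.reverse) st.2) := by
  induction rows generalizing st with
  | nil => simp [pvG, pvJoin]
  | cons r rest ih =>
    rw [List.foldl_cons, ih, pvA_inner]
    simp only [List.reverse_cons, pvG_append, pvG, pvJoin_none_right, pvJoin_assoc]

-- B's inner loop is exactly the first match in its scan order
theorem pvUltimaRow_eq (m : String) (i : Int) (cells : List (Int × String)) :
    pvUltimaRow m i cells = pvF m i cells := by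
  induction cells with
  | nil => rfl
  | cons q rest ih =>
    simp only [pvUltimaRow, pvF, List.find?_cons]
    cases h : q.2 == m
    · simp [beq_eq_false_iff_ne.mp h, ih, pvF]
    · simp [beq_iff_eq.mp h]

-- B's outer loop is exactly the first match over the rows in its scan order
theorem pvUltima_eq (m : String) (rows : List (Int × List String)) :
    pvUltima m rows = pvG m rows := by
  induction rows with
  | nil => rfl
  | cons r rest ih =>
    simp only [pvUltima, pvG, pvUltimaRow_eq, ih, pvJoin]

-- ===== VERDICT (by name: the statement is the Claim_ definition above) =====
theorem encontrar_posicoes_spec : Claim_equal_encontrar_posicoes := by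
  intro matriz _
  unfold Spec_encontrar_posicoes encontrar_posicoes encontrar_posicoes_alt
  rw [pvA_outer, pvJoin_none_right, pvJoin_none_right, pvUltima_eq, pvUltima_eq]
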